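-- pv_equiv track=rewrite | github.com/KnowEnG/platform | nest_py/lib_src/fst_pipeline/guess_feature_metadata.py | guess_feature_group
-- ===== SOURCE A (Python) =====
-- def guess_feature_group(feature):
--     """Given a feature name, returns a best-guess group name."""
--     prefix_list = (
--         ('Sha', 'Shadow'),
--         ('miRNA', 'miRNA'),
--         ('chr', 'mRNA'),
--         ('Fir', 'Firmicutes'),
--         ('Act', 'Actinobacteria'),
--         ('Bac', 'Bacterodetes'),
--         ('Pro', 'Proteobacteria'),
--         ('Ami', 'Amino Acid'),
--         ('Pep', 'Peptide'),
--         ('Car', 'Carbohydrate'),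
--         ('Ene', 'Energy'),
--         ('Lip', 'Lipid'),
--         ('Nuc', 'Nucleotide'),
--         ('Cof', 'Cofactor or Vitamin'),
--         ('Xen', 'Xenobiotics'),
--         ('Gen', 'Genus OTU'),
--         ('MET', 'Metabolite'),
--         ('OTU', 'OTU'),
--         ('V.K', 'Vaginal Functional'),
--         ('F.K', 'Fecal Functional'),
--         ('V.G', 'Vaginal Gene'),
--         ('F.G', 'Fecal Gene'),
--         ('V.', 'Vaginal OTU'),
--         ('F.', 'Fecal OTU')
--     )
--     for prefix, group in prefix_list:
--         if feature.startswith(prefix):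
--             return group
--     return 'NA'
-- ===== SOURCE B (Python) =====
-- # Re-implementation as a first-character dispatch table: the prefixes are
-- # grouped into buckets keyed by their first character; one dict lookup on
-- # feature[:1] picks the (at most 4-entry) bucket, whose (suffix, group)
-- # pairs are checked against feature[1:].  Bucket order preserves A's scan
-- # order among prefixes sharing a first character, so results coincide.
-- _BUCKETS = {
--     'S': (('ha', 'Shadow'),),
--     'm': (('iRNA', 'miRNA'),),
--     'c': (('hr', 'mRNA'),),
--     'F': (('ir', 'Firmicutes'), ('.K', 'Fecal Functional'),
--           ('.G', 'Fecal Gene'), ('.', 'Fecal OTU')),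
--     'A': (('ct', 'Actinobacteria'), ('mi', 'Amino Acid')),
--     'B': (('ac', 'Bacterodetes'),),
--     'P': (('ro', 'Proteobacteria'), ('ep', 'Peptide')),
--     'C': (('ar', 'Carbohydrate'), ('of', 'Cofactor or Vitamin')),
--     'E': (('ne', 'Energy'),),
--     'L': (('ip', 'Lipid'),),
--     'N': (('uc', 'Nucleotide'),),
--     'X': (('en', 'Xenobiotics'),),
--     'G': (('en', 'Genus OTU'),),
--     'M': (('ET', 'Metabolite'),),
--     'O': (('TU', 'OTU'),),
--     'V': (('.K', 'Vaginal Functional'), ('.G', 'Vaginal Gene'),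
--           ('.', 'Vaginal OTU')),
-- }
--
--
-- def guess_feature_group(feature):
--     """Given a feature name, returns a best-guess group name."""
--     tail = feature[1:]
--     for suffix, group in _BUCKETS.get(feature[:1], ()):
--         if tail.startswith(suffix):
--             return group
--     return 'NA'
-- ===== Notes on version B (the rewrite author's own statement) =====
-- stated objective: alternative
-- what changed: A linearly scans all 24 (prefix, group) pairs with startswith; B is a first-character dispatch: one dict lookup on feature[:1] selects a bucket of at most 4 (suffix, group) pairs checked against feature[1:], correct because prefixes with different first characters can never both match and bucket order preserves A's order.
import Mathlib
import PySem

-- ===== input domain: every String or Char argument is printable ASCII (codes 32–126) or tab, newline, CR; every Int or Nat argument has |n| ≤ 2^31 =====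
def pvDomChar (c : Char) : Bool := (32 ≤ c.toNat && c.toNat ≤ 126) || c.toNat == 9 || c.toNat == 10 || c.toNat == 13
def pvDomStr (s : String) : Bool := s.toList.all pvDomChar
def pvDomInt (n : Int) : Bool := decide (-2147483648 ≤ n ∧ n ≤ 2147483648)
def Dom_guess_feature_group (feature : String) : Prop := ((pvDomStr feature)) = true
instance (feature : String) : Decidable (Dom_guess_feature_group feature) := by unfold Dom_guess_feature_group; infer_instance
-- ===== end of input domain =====

-- B replaces A's linear scan of all 24 (prefix, group) pairs by a first-character
-- dispatch: a dict bucket keyed by feature[:1] and suffix tests on feature[1:].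

-- ===== PORT A =====
def pvPrefixList : List (String × String) :=
  [("Sha", "Shadow"), ("miRNA", "miRNA"), ("chr", "mRNA"), ("Fir", "Firmicutes"),
   ("Act", "Actinobacteria"), ("Bac", "Bacterodetes"), ("Pro", "Proteobacteria"),
   ("Ami", "Amino Acid"), ("Pep", "Peptide"), ("Car", "Carbohydrate"),
   ("Ene", "Energy"), ("Lip", "Lipid"), ("Nuc", "Nucleotide"),
   ("Cof", "Cofactor or Vitamin"), ("Xen", "Xenobiotics"), ("Gen", "Genus OTU"),
   ("MET", "Metabolite"), ("OTU", "OTU"), ("V.K", "Vaginal Functional"),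
   ("F.K", "Fecal Functional"), ("V.G", "Vaginal Gene"), ("F.G", "Fecal Gene"),
   ("V.", "Vaginal OTU"), ("F.", "Fecal OTU")]

-- the 'for prefix, group in prefix_list' loop with its early return
def pvScan : List (String × String) → String → String
  | [], _ => "NA"
  | (p, g) :: rest, feature =>
    if PySem.Str.startswith feature p then g else pvScan rest feature

def guess_feature_group (feature : String) : String := pvScan pvPrefixList feature

-- ===== PORT B =====
-- _BUCKETS of Source B: buckets of (suffix, group) pairs keyed by the first character
def pvBuckets : PySem.Dict String (List (String × String)) :=
  PySem.Dict.ofList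
    [("S", [("ha", "Shadow")]),
     ("m", [("iRNA", "miRNA")]),
     ("c", [("hr", "mRNA")]),
     ("F", [("ir", "Firmicutes"), (".K", "Fecal Functional"),
            (".G", "Fecal Gene"), (".", "Fecal OTU")]),
     ("A", [("ct", "Actinobacteria"), ("mi", "Amino Acid")]),
     ("B", [("ac", "Bacterodetes")]),
     ("P", [("ro", "Proteobacteria"), ("ep", "Peptide")]),
     ("C", [("ar", "Carbohydrate"), ("of", "Cofactor or Vitamin")]),
     ("E", [("ne", "Energy")]),
     ("L", [("ip", "Lipid")]),
     ("N", [("uc", "Nucleotide")]),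
     ("X", [("en", "Xenobiotics")]),
     ("G", [("en", "Genus OTU")]),
     ("M", [("ET", "Metabolite")]),
     ("O", [("TU", "OTU")]),
     ("V", [(".K", "Vaginal Functional"), (".G", "Vaginal Gene"),
            (".", "Vaginal OTU")])]

-- the 'for suffix, group in bucket' loop over the selected bucket
def pvBucketLoop : List (String × String) → String → String
  | [], _ => "NA"
  | (suffix, group) :: rest, tail =>
    if PySem.Str.startswith tail suffix then group else pvBucketLoop rest tail

def guess_feature_group_alt (feature : String) : String :=
  let tail := PySem.Str.slice feature (some 1) none
  pvBucketLoop ((pvBuckets.get? (PySem.Str.slice feature none (some 1))).getD []) tail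

-- ===== PRECONDITION & SPEC =====
def Spec_guess_feature_group (feature : String) (out : String) : Prop := out = guess_feature_group_alt feature
instance (feature : String) (out : String) : Decidable (Spec_guess_feature_group feature out) := by unfold Spec_guess_feature_group; infer_instance

-- ===== CLAIM (what is proved, stated in full; the proofs are below) =====
def Claim_equal_guess_feature_group : Prop := ∀ (feature : String), Dom_guess_feature_group feature → Spec_guess_feature_group feature (guess_feature_group feature)

-- ===== LEMMAS AND PROOFS =====

theorem pv_sw (s p : String) :
    (PySem.Str.startswith s p = true) ↔ (s.toList.take p.toList.length = p.toList) := by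
  rw [PySem.Str.startswith_eq, PySem.Chars.startswith_iff, List.prefix_iff_eq_take]
  exact eq_comm

theorem pv_eq_slice (k s : String) (n : Int) (hn : 0 ≤ n) :
    (k = PySem.Str.slice s none (some n)) ↔ (s.toList.take n.toNat = k.toList) := by
  rw [String.ext_iff, PySem.Str.toList_slice, PySem.Chars.slice_eq_listSlice]
  simp only [PySem.List.slice_to s.toList hn]
  exact eq_comm

theorem pv_bget (x : String) : pvBuckets.get? x =
    if "S" = x then some [("ha", "Shadow")] else
    if "m" = x then some [("iRNA", "miRNA")] else
    if "c" = x then some [("hr", "mRNA")] else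
    if "F" = x then some [("ir", "Firmicutes"), (".K", "Fecal Functional"),
                          (".G", "Fecal Gene"), (".", "Fecal OTU")] else
    if "A" = x then some [("ct", "Actinobacteria"), ("mi", "Amino Acid")] else
    if "B" = x then some [("ac", "Bacterodetes")] else
    if "P" = x then some [("ro", "Proteobacteria"), ("ep", "Peptide")] else
    if "C" = x then some [("ar", "Carbohydrate"), ("of", "Cofactor or Vitamin")] else
    if "E" = x then some [("ne", "Energy")] else
    if "L" = x then some [("ip", "Lipid")] else
    if "N" = x then some [("uc", "Nucleotide")] else
    if "X" = x then some [("en", "Xenobiotics")] else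
    if "G" = x then some [("en", "Genus OTU")] else
    if "M" = x then some [("ET", "Metabolite")] else
    if "O" = x then some [("TU", "OTU")] else
    if "V" = x then some [(".K", "Vaginal Functional"), (".G", "Vaginal Gene"),
                          (".", "Vaginal OTU")] else none := by
  have h : pvBuckets = PySem.Dict.mk
    [("S", [("ha", "Shadow")]),
     ("m", [("iRNA", "miRNA")]),
     ("c", [("hr", "mRNA")]),
     ("F", [("ir", "Firmicutes"), (".K", "Fecal Functional"),
            (".G", "Fecal Gene"), (".", "Fecal OTU")]),
     ("A", [("ct", "Actinobacteria"), ("mi", "Amino Acid")]),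
     ("B", [("ac", "Bacterodetes")]),
     ("P", [("ro", "Proteobacteria"), ("ep", "Peptide")]),
     ("C", [("ar", "Carbohydrate"), ("of", "Cofactor or Vitamin")]),
     ("E", [("ne", "Energy")]),
     ("L", [("ip", "Lipid")]),
     ("N", [("uc", "Nucleotide")]),
     ("X", [("en", "Xenobiotics")]),
     ("G", [("en", "Genus OTU")]),
     ("M", [("ET", "Metabolite")]),
     ("O", [("TU", "OTU")]),
     ("V", [(".K", "Vaginal Functional"), (".G", "Vaginal Gene"),
            (".", "Vaginal OTU")])] := by rfl
  rw [h]
  simp only [PySem.Dict.get?_mk_cons, beq_iff_eq]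
  rfl

theorem pv_getD_ite {α : Type} (c : Prop) [Decidable c] (x y : Option α) (d : α) :
    (if c then x else y).getD d = if c then x.getD d else y.getD d := by
  split <;> rfl

theorem pv_key (feature : String) (c : Char) (t : List Char)
    (hl : feature.toList = c :: t) (s : String) (k : Char) (hs : s.toList = [k]) :
    (s = PySem.Str.slice feature none (some 1)) ↔ (c = k) := by
  rw [pv_eq_slice s feature 1 (by norm_num), hl, hs]
  simp

theorem pv_swA (feature : String) (c : Char) (t : List Char)
    (hl : feature.toList = c :: t) (p : String) (c0 : Char) (ps : List Char)
    (hp : p.toList = c0 :: ps) :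
    (PySem.Str.startswith feature p = true) ↔ (c = c0 ∧ t.take ps.length = ps) := by
  rw [pv_sw, hl, hp]
  simp [List.take_succ_cons]

theorem pv_swB' (feature : String) (c : Char) (t : List Char)
    (hl : feature.toList = c :: t) (ps : List Char) :
    (PySem.Chars.startswith (PySem.List.slice feature.toList (some 1) none) ps = true) ↔
      (t.take ps.length = ps) := by
  rw [PySem.Chars.startswith_iff, PySem.List.slice_from _ (by norm_num : (0:Int) ≤ 1), hl]
  simp [List.prefix_iff_eq_take, eq_comm]

set_option maxHeartbeats 2000000 in
theorem pv_main (feature : String) : guess_feature_group feature = guess_feature_group_alt feature := by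
  cases hl : feature.toList with
  | nil =>
    have hf : feature = "" := by
      rw [String.ext_iff, hl]; rfl
    subst hf; decide
  | cons c t =>
    simp only [guess_feature_group, pvPrefixList, pvScan, guess_feature_group_alt,
      pv_bget, pv_getD_ite, Option.getD_some, Option.getD_none,
      pv_key feature c t hl "S" 'S' (by decide),
      pv_key feature c t hl "m" 'm' (by decide),
      pv_key feature c t hl "c" 'c' (by decide),
      pv_key feature c t hl "F" 'F' (by decide),
      pv_key feature c t hl "A" 'A' (by decide),
      pv_key feature c t hl "B" 'B' (by decide),
      pv_key feature c t hl "P" 'P' (by decide),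
      pv_key feature c t hl "C" 'C' (by decide),
      pv_key feature c t hl "E" 'E' (by decide),
      pv_key feature c t hl "L" 'L' (by decide),
      pv_key feature c t hl "N" 'N' (by decide),
      pv_key feature c t hl "X" 'X' (by decide),
      pv_key feature c t hl "G" 'G' (by decide),
      pv_key feature c t hl "M" 'M' (by decide),
      pv_key feature c t hl "O" 'O' (by decide),
      pv_key feature c t hl "V" 'V' (by decide),
      pv_swA feature c t hl "Sha" 'S' ['h','a'] (by decide),
      pv_swA feature c t hl "miRNA" 'm' ['i','R','N','A'] (by decide),
      pv_swA feature c t hl "chr" 'c' ['h','r'] (by decide),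
      pv_swA feature c t hl "Fir" 'F' ['i','r'] (by decide),
      pv_swA feature c t hl "Act" 'A' ['c','t'] (by decide),
      pv_swA feature c t hl "Bac" 'B' ['a','c'] (by decide),
      pv_swA feature c t hl "Pro" 'P' ['r','o'] (by decide),
      pv_swA feature c t hl "Ami" 'A' ['m','i'] (by decide),
      pv_swA feature c t hl "Pep" 'P' ['e','p'] (by decide),
      pv_swA feature c t hl "Car" 'C' ['a','r'] (by decide),
      pv_swA feature c t hl "Ene" 'E' ['n','e'] (by decide),
      pv_swA feature c t hl "Lip" 'L' ['i','p'] (by decide),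
      pv_swA feature c t hl "Nuc" 'N' ['u','c'] (by decide),
      pv_swA feature c t hl "Cof" 'C' ['o','f'] (by decide),
      pv_swA feature c t hl "Xen" 'X' ['e','n'] (by decide),
      pv_swA feature c t hl "Gen" 'G' ['e','n'] (by decide),
      pv_swA feature c t hl "MET" 'M' ['E','T'] (by decide),
      pv_swA feature c t hl "OTU" 'O' ['T','U'] (by decide),
      pv_swA feature c t hl "V.K" 'V' ['.','K'] (by decide),
      pv_swA feature c t hl "F.K" 'F' ['.','K'] (by decide),
      pv_swA feature c t hl "V.G" 'V' ['.','G'] (by decide),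
      pv_swA feature c t hl "F.G" 'F' ['.','G'] (by decide),
      pv_swA feature c t hl "V." 'V' ['.'] (by decide),
      pv_swA feature c t hl "F." 'F' ['.'] (by decide)]
    by_cases h0 : c = 'S'
    · subst h0; simp [pvBucketLoop, pv_swB' feature 'S' t hl]
    by_cases h1 : c = 'm'
    · subst h1; simp [pvBucketLoop, pv_swB' feature 'm' t hl]
    by_cases h2 : c = 'c'
    · subst h2; simp [pvBucketLoop, pv_swB' feature 'c' t hl]
    by_cases h3 : c = 'F'
    · subst h3; simp [pvBucketLoop, pv_swB' feature 'F' t hl]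
    by_cases h4 : c = 'A'
    · subst h4; simp [pvBucketLoop, pv_swB' feature 'A' t hl]
    by_cases h5 : c = 'B'
    · subst h5; simp [pvBucketLoop, pv_swB' feature 'B' t hl]
    by_cases h6 : c = 'P'
    · subst h6; simp [pvBucketLoop, pv_swB' feature 'P' t hl]
    by_cases h7 : c = 'C'
    · subst h7; simp [pvBucketLoop, pv_swB' feature 'C' t hl]
    by_cases h8 : c = 'E'
    · subst h8; simp [pvBucketLoop, pv_swB' feature 'E' t hl]
    by_cases h9 : c = 'L'
    · subst h9; simp [pvBucketLoop, pv_swB' feature 'L' t hl]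
    by_cases h10 : c = 'N'
    · subst h10; simp [pvBucketLoop, pv_swB' feature 'N' t hl]
    by_cases h11 : c = 'X'
    · subst h11; simp [pvBucketLoop, pv_swB' feature 'X' t hl]
    by_cases h12 : c = 'G'
    · subst h12; simp [pvBucketLoop, pv_swB' feature 'G' t hl]
    by_cases h13 : c = 'M'
    · subst h13; simp [pvBucketLoop, pv_swB' feature 'M' t hl]
    by_cases h14 : c = 'O'
    · subst h14; simp [pvBucketLoop, pv_swB' feature 'O' t hl]
    by_cases h15 : c = 'V'
    · subst h15; simp [pvBucketLoop, pv_swB' feature 'V' t hl]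
    simp [h0, h1, h2, h3, h4, h5, h6, h7, h8, h9, h10, h11, h12, h13, h14, h15, pvBucketLoop]

-- ===== VERDICT (by name: the statement is the Claim_ definition above) =====
theorem guess_feature_group_spec : Claim_equal_guess_feature_group := by
  intro feature _
  unfold Spec_guess_feature_group
  exact pv_main feature
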